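-- pv_equiv track=rewrite | github.com/venkatkumarvk/GAN_With_GenAI | evaluator.py | _find_duplicate_indices
-- ===== SOURCE A (Python) =====
-- def _find_duplicate_indices(items: list) -> list:
--     """Find indices of duplicate items (keep first, mark rest)."""
--     signatures = {}
--     duplicates = []
--
--     for idx, item in enumerate(items):
--         if not isinstance(item, dict):
--             continue
--         sig_parts = []
--         for key, val in sorted(item.items()):
--             if key == 'id':
--                 continue
--             if isinstance(val, dict):
--                 v = str(val.get('value', '')).strip().lower()
--                 if v and 'date' not in key and 'status' not in key:
--                     sig_parts.append(v)
--         sig = '|'.join(sig_parts)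
--         if not sig:
--             continue
--         if sig in signatures:
--             duplicates.append(idx)
--         else:
--             signatures[sig] = idx
--
--     return duplicates
-- ===== SOURCE B (Python) =====
-- def _find_duplicate_indices(items: list) -> list:
--     """Find indices of duplicate items (keep first, mark rest)."""
--     def _signature(item):
--         if not isinstance(item, dict):
--             return ''
--         parts = [str(val.get('value', '')).strip().lower()
--                  for key, val in sorted(item.items())
--                  if key != 'id' and isinstance(val, dict)
--                  and str(val.get('value', '')).strip().lower() != ''
--                  and 'date' not in key and 'status' not in key]
--         return '|'.join(parts)
--
--     groups = {}
--     for idx, item in enumerate(items):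
--         sig = _signature(item)
--         if sig:
--             groups[sig] = groups.get(sig, []) + [idx]
--
--     dups = []
--     for idxs in groups.values():
--         dups.extend(idxs[1:])
--     return sorted(dups)
-- ===== Notes on version B (the rewrite author's own statement) =====
-- stated objective: alternative
-- what changed: B replaces A's single pass with a first-seen dict and an accumulator by a staged group-then-flatten computation: it builds a dict mapping each non-empty signature to the list of all indices bearing it, then emits every index after the first of each group and sorts the result.
import Mathlib
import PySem

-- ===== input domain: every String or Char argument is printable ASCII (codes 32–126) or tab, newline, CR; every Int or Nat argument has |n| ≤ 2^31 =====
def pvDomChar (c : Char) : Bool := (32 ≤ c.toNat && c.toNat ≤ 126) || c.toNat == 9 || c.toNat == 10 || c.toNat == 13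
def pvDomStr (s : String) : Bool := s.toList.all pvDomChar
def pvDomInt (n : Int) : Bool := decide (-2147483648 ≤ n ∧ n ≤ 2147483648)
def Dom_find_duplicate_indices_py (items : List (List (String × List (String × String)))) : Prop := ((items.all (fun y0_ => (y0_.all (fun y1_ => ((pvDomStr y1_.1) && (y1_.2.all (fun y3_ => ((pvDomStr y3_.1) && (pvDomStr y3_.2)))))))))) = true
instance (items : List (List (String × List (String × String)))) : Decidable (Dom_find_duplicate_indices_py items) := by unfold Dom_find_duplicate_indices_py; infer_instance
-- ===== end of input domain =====

-- B replaces A's single first-seen pass by a staged computation: group all indices by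
-- signature in a dict, emit every index after the first of each group, sort (objective:
-- alternative; same return value).

-- ===== PORT A =====
-- str(val.get('value', '')).strip().lower() — shared between the two ports because both
-- Pythons contain this identical expression
def pvSigVal (v : List (String × String)) : String :=
  PySem.Str.lower (PySem.Str.strip ((PySem.Dict.ofList v).getD "value" ""))

-- sorted(item.items()): dict keys are unique, so Python's tuple sort compares keys only
def pvSortedItems (item : List (String × List (String × String))) :
    List (String × List (String × String)) :=
  PySem.List.sorted (PySem.Dict.ofList item).items (fun p => p.1) false

-- the inner 'for key, val in sorted(item.items())' loop of A building sig_parts, then '|'.join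
-- (isinstance(item, dict) / isinstance(val, dict) are always true under the type convention)
def pvSigA (item : List (String × List (String × String))) : String :=
  PySem.Str.join "|"
    ((pvSortedItems item).foldl
      (fun acc p =>
        if p.1 = "id" then acc
        else
          let v := pvSigVal p.2
          if v ≠ "" ∧ PySem.Str.isIn "date" p.1 = false ∧ PySem.Str.isIn "status" p.1 = false
          then acc ++ [v] else acc)
      [])

def find_duplicate_indices_py (items : List (List (String × List (String × String)))) : List Int :=
  ((PySem.List.enumerate items).foldl
    (fun (st : PySem.Dict String Int × List Int) p =>
      let sig := pvSigA p.2
      if sig = "" then st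
      else if st.1.contains sig then (st.1, st.2 ++ [p.1])
      else (st.1.insert sig p.1, st.2))
    (PySem.Dict.empty, [])).2

-- ===== PORT B =====
-- Source B's _signature helper: a comprehension (filter + map over the sorted items), then '|'.join
def pvSigB (item : List (String × List (String × String))) : String :=
  PySem.Str.join "|"
    (((pvSortedItems item).filter
        (fun p => (!(p.1 == "id")) && (!(pvSigVal p.2 == ""))
                  && (!(PySem.Str.isIn "date" p.1)) && (!(PySem.Str.isIn "status" p.1)))).map
      (fun p => pvSigVal p.2))

-- Source B: build groups (sig ↦ all indices), extend dups with idxs[1:] per group, sorted(dups)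
def find_duplicate_indices_py_alt (items : List (List (String × List (String × String)))) : List Int :=
  let groups :=
    (PySem.List.enumerate items).foldl
      (fun (d : PySem.Dict String (List Int)) p =>
        let sig := pvSigB p.2
        if sig ≠ "" then d.modify sig [] (· ++ [p.1]) else d)
      PySem.Dict.empty
  let dups := groups.values.foldl (fun acc idxs => acc ++ PySem.List.slice idxs (some 1) none) []
  PySem.List.sorted dups (fun x => x) false

-- ===== PRECONDITION & SPEC =====
def Spec_find_duplicate_indices_py (items : List (List (String × List (String × String)))) (out : List Int) : Prop := out = find_duplicate_indices_py_alt items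
instance (items : List (List (String × List (String × String)))) (out : List Int) : Decidable (Spec_find_duplicate_indices_py items out) := by unfold Spec_find_duplicate_indices_py; infer_instance

-- ===== CLAIM (what is proved, stated in full; the proofs are below) =====
def Claim_equal_find_duplicate_indices_py : Prop := ∀ (items : List (List (String × List (String × String)))), Dom_find_duplicate_indices_py items → Spec_find_duplicate_indices_py items (find_duplicate_indices_py items)

-- ===== LEMMAS AND PROOFS =====

-- the qualifying (signature, index) pairs, in index order
def pvQual (E : List (Int × String)) : List (String × Int) :=
  E.filterMap (fun p => if p.2 ≠ "" then some (p.2, p.1) else none)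

-- A's loop, abstracted: emit the index of every pair whose key was already seen
def pvGo (seen : List String) : List (String × Int) → List Int
  | [] => []
  | q :: rest => if q.1 ∈ seen then q.2 :: pvGo seen rest else pvGo (seen ++ [q.1]) rest

-- B's staged result, abstracted: per key, all indices (key already seen) or all but the first
def pvDups (seen : List String) (Q : List (String × Int)) : List Int :=
  (PySem.Set.ofList (Q.map (·.1))).flatMap
    (fun k =>
      let g := ((Q.filter (fun q => q.1 == k)).map (·.2))
      if k ∈ seen then g else g.tail)

-- A's inner-loop step (continue-if / nested if) equals a single filter-style conditional append
theorem pvStep_eq (acc : List String) (p : String × List (String × String)) :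
    (if p.1 = "id" then acc
     else
       if pvSigVal p.2 ≠ "" ∧ PySem.Str.isIn "date" p.1 = false ∧ PySem.Str.isIn "status" p.1 = false
       then acc ++ [pvSigVal p.2] else acc)
    = if ((!(p.1 == "id")) && (!(pvSigVal p.2 == ""))
          && (!(PySem.Str.isIn "date" p.1)) && (!(PySem.Str.isIn "status" p.1))) = true
      then acc ++ [pvSigVal p.2] else acc := by
  by_cases hid : p.1 = "id"
  · simp [hid]
  · by_cases hv : pvSigVal p.2 = ""
    · simp [hid, hv]
    · simp [hid, hv]

-- the two signature computations agree
theorem pvSig_eq (item : List (String × List (String × String))) : pvSigA item = pvSigB item := by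
  unfold pvSigA pvSigB
  congr 1
  have hf : (fun (acc : List String) (p : String × List (String × String)) =>
        if p.1 = "id" then acc
        else
          let v := pvSigVal p.2
          if v ≠ "" ∧ PySem.Str.isIn "date" p.1 = false ∧ PySem.Str.isIn "status" p.1 = false
          then acc ++ [v] else acc)
      = (fun (acc : List String) (p : String × List (String × String)) =>
        if ((!(p.1 == "id")) && (!(pvSigVal p.2 == ""))
            && (!(PySem.Str.isIn "date" p.1)) && (!(PySem.Str.isIn "status" p.1))) = true
        then acc ++ [pvSigVal p.2] else acc) := by
    funext acc p
    exact pvStep_eq acc p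
  rw [hf, PySem.List.foldl_append_if, List.nil_append]

-- enumerate of a mapped list
theorem pv_enumerate_map {α β : Type} (f : α → β) (xs : List α) (s : Int) :
    PySem.List.enumerate (xs.map f) s = (PySem.List.enumerate xs s).map (fun p => (p.1, f p.2)) := by
  induction xs generalizing s with
  | nil => simp [PySem.List.enumerate_nil]
  | cons x t ih => simp [PySem.List.enumerate_cons, ih]

-- A's fold with a first-seen dict is pvGo over the qualifying pairs
theorem pv_coreA (E : List (Int × String)) :
    ∀ (d : PySem.Dict String Int) (acc : List Int) (seen : List String),
      (∀ t : String, d.contains t = true ↔ t ∈ seen) →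
      (E.foldl
        (fun (st : PySem.Dict String Int × List Int) p =>
          if p.2 = "" then st
          else if st.1.contains p.2 then (st.1, st.2 ++ [p.1])
          else (st.1.insert p.2 p.1, st.2)) (d, acc)).2
      = acc ++ pvGo seen (pvQual E) := by
  induction E with
  | nil => intro d acc seen _; simp [pvQual, pvGo]
  | cons p rest ih =>
    intro d acc seen hinv
    by_cases hp : p.2 = ""
    · simpa [pvQual, List.filterMap_cons, hp] using ih d acc seen hinv
    · by_cases hc : d.contains p.2 = true
      · have hmem : p.2 ∈ seen := (hinv p.2).1 hc
        simp only [List.foldl_cons, if_neg hp, if_pos hc]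
        rw [ih d (acc ++ [p.1]) seen hinv]
        simp [pvQual, hp, pvGo, hmem]
      · have hmem : p.2 ∉ seen := fun h => hc ((hinv p.2).2 h)
        simp only [List.foldl_cons, if_neg hp, if_neg hc]
        have hinv' : ∀ t : String, (d.insert p.2 p.1).contains t = true ↔ t ∈ seen ++ [p.2] := by
          intro t
          rw [PySem.Dict.contains_insert]
          by_cases ht : t = p.2
          · subst ht; simp
          · simp only [List.mem_append, List.mem_singleton, ht, or_false]
            constructor
            · intro h
              rcases Bool.or_eq_true_iff.mp h with h | h
              · exact absurd (eq_of_beq h) ht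
              · exact (hinv t).1 h
            · intro h; exact Bool.or_eq_true_iff.mpr (Or.inr ((hinv t).2 h))
        rw [ih (d.insert p.2 p.1) acc (seen ++ [p.2]) hinv']
        simp [pvQual, hp, pvGo, hmem]

-- B's grouping fold over the enumeration is the grouping fold over the qualifying pairs
theorem pv_coreB (E : List (Int × String)) :
    ∀ (d : PySem.Dict String (List Int)),
      E.foldl
        (fun (d : PySem.Dict String (List Int)) p =>
          if p.2 ≠ "" then d.modify p.2 [] (· ++ [p.1]) else d) d
      = (pvQual E).foldl (fun d q => d.modify q.1 [] (· ++ [q.2])) d := by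
  induction E with
  | nil => intro d; simp [pvQual]
  | cons p rest ih =>
    intro d
    by_cases hp : p.2 = "" <;> simp [pvQual, hp] at * <;> simp [ih]

-- every element of pvGo is some pair's index
theorem pvGo_mem {x : Int} : ∀ {Q : List (String × Int)} {seen : List String},
    x ∈ pvGo seen Q → ∃ q ∈ Q, x = q.2 := by
  intro Q
  induction Q with
  | nil => intro seen h; simp [pvGo] at h
  | cons q rest ih =>
    intro seen h
    by_cases hm : q.1 ∈ seen
    · simp only [pvGo, if_pos hm, List.mem_cons] at h
      rcases h with h | h
      · exact ⟨q, List.mem_cons_self, h⟩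
      · obtain ⟨q', hq', hx⟩ := ih h
        exact ⟨q', List.mem_cons_of_mem _ hq', hx⟩
    · simp only [pvGo, if_neg hm] at h
      obtain ⟨q', hq', hx⟩ := ih h
      exact ⟨q', List.mem_cons_of_mem _ hq', hx⟩

-- pvGo preserves strict increase of the indices
theorem pvGo_pairwise : ∀ (Q : List (String × Int)) (seen : List String),
    Q.Pairwise (fun a b => a.2 < b.2) → (pvGo seen Q).Pairwise (· < ·) := by
  intro Q
  induction Q with
  | nil => intro seen _; simp [pvGo]
  | cons q rest ih =>
    intro seen hpw
    rcases List.pairwise_cons.mp hpw with ⟨hq, hrest⟩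
    by_cases hm : q.1 ∈ seen
    · simp only [pvGo, if_pos hm]
      refine List.pairwise_cons.mpr ⟨?_, ih seen hrest⟩
      intro x hx
      obtain ⟨q', hq', hx'⟩ := pvGo_mem hx
      exact hx' ▸ hq q' hq'
    · simp only [pvGo, if_neg hm]
      exact ih _ hrest

-- the qualifying pairs of an enumeration have strictly increasing indices
theorem pvQual_pairwise (E : List (Int × String)) (h : E.Pairwise (fun p q => p.1 < q.1)) :
    (pvQual E).Pairwise (fun a b => a.2 < b.2) := by
  refine List.Pairwise.filterMap _ ?_ h
  intro a b hab x hx y hy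
  by_cases ha : a.2 = "" <;> simp [ha] at hx
  by_cases hb : b.2 = "" <;> simp [hb] at hy
  subst hx; subst hy
  exact hab

-- a nodup key set containing s is a permutation of s consed onto the set without s
theorem pv_perm_discard (S : List String) (hS : S.Nodup) (s : String) (hs : s ∈ S) :
    S.Perm (s :: PySem.Set.discard S s) := by
  have hnd : (s :: PySem.Set.discard S s).Nodup := by
    refine List.nodup_cons.mpr ⟨?_, PySem.Set.nodup_discard S s hS⟩
    intro h
    exact ((PySem.Set.mem_discard S s s).mp h).2 rfl
  refine (List.perm_ext_iff_of_nodup hS hnd).mpr ?_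
  intro a
  by_cases ha : a = s
  · subst ha; simp [hs]
  · simp [PySem.Set.mem_discard, ha]

theorem pv_discard_of_not_mem (S : List String) (s : String) (hs : s ∉ S) :
    PySem.Set.discard S s = S := by
  refine List.filter_eq_self.mpr ?_
  intro a ha
  have hne : a ≠ s := fun h => hs (h ▸ ha)
  simp [hne]

-- peeling one key off the key set: f s ++ flatMap over the rest of the keys
theorem pv_cons_flat (S : List String) (hS : S.Nodup) (s : String) (f : String → List Int)
    (h0 : s ∉ S → f s = []) :
    (f s ++ (PySem.Set.discard S s).flatMap f).Perm (S.flatMap f) := by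
  by_cases hs : s ∈ S
  · exact ((List.Perm.flatMap_right f (pv_perm_discard S hS s hs)).symm : _)
  · rw [pv_discard_of_not_mem S s hs, h0 hs, List.nil_append]

-- pvDups is a permutation of pvGo
theorem pv_perm (Q : List (String × Int)) : ∀ (seen : List String),
    (pvDups seen Q).Perm (pvGo seen Q) := by
  induction Q with
  | nil => intro seen; simp [pvDups, pvGo, PySem.Set.ofList]
  | cons q rest ih =>
    intro seen
    have hS : (PySem.Set.ofList (rest.map (·.1))).Nodup := PySem.Set.nodup_ofList _
    have hmemS : ∀ k, k ∈ PySem.Set.ofList (rest.map (·.1)) ↔ k ∈ rest.map (·.1) :=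
      fun k => PySem.Set.mem_ofList _ k
    -- the group of a key k ≠ q.1 is unaffected by the leading pair
    have hgrp : ∀ k, k ≠ q.1 →
        ((q :: rest).filter (fun r => r.1 == k)) = rest.filter (fun r => r.1 == k) := by
      intro k hk
      rw [List.filter_cons]
      simp [Ne.symm hk]
    -- the head key's group over (q :: rest) gains q in front
    have hgq : ((q :: rest).filter (fun r => r.1 == q.1)).map (·.2)
        = q.2 :: (rest.filter (fun r => r.1 == q.1)).map (·.2) := by
      rw [List.filter_cons]
      simp
    have hempty : q.1 ∉ PySem.Set.ofList (rest.map (·.1)) →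
        (rest.filter (fun r => r.1 == q.1)).map (·.2) = [] := by
      intro h
      rw [hmemS] at h
      have : rest.filter (fun r => r.1 == q.1) = [] := by
        refine List.filter_eq_nil_iff.mpr ?_
        intro r hr
        simp only [beq_iff_eq]
        intro he; exact h (he ▸ List.mem_map_of_mem hr)
      rw [this]; rfl
    unfold pvDups
    rw [List.map_cons, PySem.Set.ofList_cons, List.flatMap_cons]
    by_cases hm : q.1 ∈ seen
    · -- key already seen: its whole group (with q.2 in front) is emitted
      rw [show pvGo seen (q :: rest) = q.2 :: pvGo seen rest by simp [pvGo, hm]]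
      simp only [if_pos hm, hgq]
      rw [List.cons_append]
      refine List.Perm.cons q.2 ?_
      have hcongr : ((PySem.Set.ofList (rest.map (·.1))).discard q.1).flatMap
            (fun k => if k ∈ seen
              then ((q :: rest).filter (fun r => r.1 == k)).map (·.2)
              else (((q :: rest).filter (fun r => r.1 == k)).map (·.2)).tail)
          = ((PySem.Set.ofList (rest.map (·.1))).discard q.1).flatMap
            (fun k => if k ∈ seen
              then (rest.filter (fun r => r.1 == k)).map (·.2)
              else ((rest.filter (fun r => r.1 == k)).map (·.2)).tail) := by
        refine List.flatMap_congr ?_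
        intro k hk
        have hkne : k ≠ q.1 := (PySem.Set.mem_discard _ _ _).mp hk |>.2
        rw [hgrp k hkne]
      rw [hcongr]
      have hflat := pv_cons_flat (PySem.Set.ofList (rest.map (·.1))) hS q.1
        (fun k => if k ∈ seen
          then (rest.filter (fun r => r.1 == k)).map (·.2)
          else ((rest.filter (fun r => r.1 == k)).map (·.2)).tail)
        (by intro h; simp [hempty h])
      simp only [if_pos hm] at hflat
      exact hflat.trans (ih seen)
    · -- fresh key: the first index q.2 of its group is dropped by tail
      rw [show pvGo seen (q :: rest) = pvGo (seen ++ [q.1]) rest by simp [pvGo, hm]]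
      simp only [if_neg hm, hgq, List.tail_cons]
      have hcongr : ((PySem.Set.ofList (rest.map (·.1))).discard q.1).flatMap
            (fun k => if k ∈ seen
              then ((q :: rest).filter (fun r => r.1 == k)).map (·.2)
              else (((q :: rest).filter (fun r => r.1 == k)).map (·.2)).tail)
          = ((PySem.Set.ofList (rest.map (·.1))).discard q.1).flatMap
            (fun k => if k ∈ seen ++ [q.1]
              then (rest.filter (fun r => r.1 == k)).map (·.2)
              else ((rest.filter (fun r => r.1 == k)).map (·.2)).tail) := by
        refine List.flatMap_congr ?_
        intro k hk
        have hkne : k ≠ q.1 := (PySem.Set.mem_discard _ _ _).mp hk |>.2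
        rw [hgrp k hkne]
        by_cases hks : k ∈ seen <;> simp [hks, hkne]
      rw [hcongr]
      have hflat := pv_cons_flat (PySem.Set.ofList (rest.map (·.1))) hS q.1
        (fun k => if k ∈ seen ++ [q.1]
          then (rest.filter (fun r => r.1 == k)).map (·.2)
          else ((rest.filter (fun r => r.1 == k)).map (·.2)).tail)
        (by intro h; simp [hempty h])
      simp only [if_pos (show q.1 ∈ seen ++ [q.1] by simp)] at hflat
      exact hflat.trans (ih (seen ++ [q.1]))

-- ===== VERDICT (by name: the statement is the Claim_ definition above) =====
theorem find_duplicate_indices_py_spec : Claim_equal_find_duplicate_indices_py := by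
  intro items _
  unfold Spec_find_duplicate_indices_py find_duplicate_indices_py find_duplicate_indices_py_alt
  -- both enumerations become enumerations of the common signature list
  have hA :
      (PySem.List.enumerate items 0).foldl
        (fun (st : PySem.Dict String Int × List Int) p =>
          let sig := pvSigA p.2
          if sig = "" then st
          else if st.1.contains sig then (st.1, st.2 ++ [p.1])
          else (st.1.insert sig p.1, st.2)) (PySem.Dict.empty, [])
      = (PySem.List.enumerate (items.map pvSigB) 0).foldl
        (fun (st : PySem.Dict String Int × List Int) p =>
          if p.2 = "" then st
          else if st.1.contains p.2 then (st.1, st.2 ++ [p.1])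
          else (st.1.insert p.2 p.1, st.2)) (PySem.Dict.empty, []) := by
    rw [pv_enumerate_map, List.foldl_map]
    simp only [pvSig_eq]
  have hB :
      (PySem.List.enumerate items 0).foldl
        (fun (d : PySem.Dict String (List Int)) p =>
          let sig := pvSigB p.2
          if sig ≠ "" then d.modify sig [] (· ++ [p.1]) else d) PySem.Dict.empty
      = (PySem.List.enumerate (items.map pvSigB) 0).foldl
        (fun (d : PySem.Dict String (List Int)) p =>
          if p.2 ≠ "" then d.modify p.2 [] (· ++ [p.1]) else d) PySem.Dict.empty := by
    rw [pv_enumerate_map, List.foldl_map]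
  simp only [hA, hB]
  -- name the quantities
  have hcoreA := pv_coreA (PySem.List.enumerate (items.map pvSigB) 0) PySem.Dict.empty [] []
    (by intro t; simp [PySem.Dict.contains_empty])
  rw [hcoreA, List.nil_append]
  rw [pv_coreB (PySem.List.enumerate (items.map pvSigB) 0) PySem.Dict.empty]
  -- B side: values of the group dict, then flatten of tails, then sort
  have hnd : ((pvQual (PySem.List.enumerate (items.map pvSigB) 0)).foldl
      (fun d q => d.modify q.1 [] (· ++ [q.2])) PySem.Dict.empty).keys.Nodup :=
    PySem.Dict.nodup_keys_foldl_modify_key _ (fun q : String × Int => q.1) [] (fun _ q => (· ++ [q.2])) _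
      (by simp)
  rw [PySem.Dict.values_eq_map_keys _ hnd []]
  rw [PySem.Dict.keys_foldl_modify_key _ (fun q : String × Int => q.1) [] (fun _ q => (· ++ [q.2]))]
  rw [PySem.Dict.keys_empty, PySem.Set.update_nil_left]
  rw [PySem.List.foldl_append_eq_flatMap, List.nil_append, List.flatMap_map]
  have hgetD : ∀ k, ((pvQual (PySem.List.enumerate (items.map pvSigB) 0)).foldl
        (fun d q => d.modify q.1 [] (· ++ [q.2])) PySem.Dict.empty).getD k []
      = ((pvQual (PySem.List.enumerate (items.map pvSigB) 0)).filter
          (fun q => q.1 == k)).map (·.2) := by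
    intro k
    rw [PySem.Dict.getD_foldl_modify_append, PySem.Dict.getD_empty, List.nil_append]
  have hdups :
      (PySem.Set.ofList ((pvQual (PySem.List.enumerate (items.map pvSigB) 0)).map (·.1))).flatMap
        (fun k => PySem.List.slice (((pvQual (PySem.List.enumerate (items.map pvSigB) 0)).foldl
          (fun d q => d.modify q.1 [] (· ++ [q.2])) PySem.Dict.empty).getD k []) (some 1) none)
      = pvDups [] (pvQual (PySem.List.enumerate (items.map pvSigB) 0)) := by
    refine List.flatMap_congr ?_
    intro k _
    rw [hgetD k, PySem.List.slice_from_one]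
    simp
  rw [hdups]
  refine (PySem.List.sorted_eq_of_perm_of_pairwise_lt _ _ _ ?_ ?_).symm
  · exact ((pv_perm _ []).symm : _)
  · exact pvGo_pairwise _ [] (pvQual_pairwise _ (PySem.List.pairwise_lt_enumerate _ _))
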